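-- pv_equiv track=rewrite | github.com/snooow1029/ETOM | src/lv3_generation.py | filter_maximal_paths
-- ===== SOURCE A (Python) =====
-- from typing import Any, Dict, List, Optional, Sequence, Set, Tuple
--
-- def filter_maximal_paths(chains: List[List[str]]) -> List[List[str]]:
-- 	if not chains:
-- 		return []
-- 	chains.sort(key=len, reverse=True)
-- 	maximal: List[List[str]] = []
-- 	for chain in chains:
-- 		chain_str = ",".join(chain)
-- 		if any(chain_str in ",".join(existing) for existing in maximal):
-- 			continue
-- 		maximal.append(chain)
-- 	return maximal
-- ===== SOURCE B (Python) =====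
-- def filter_maximal_paths(chains):
--     # Declarative reformulation: a chain is kept iff its join-string is not a
--     # substring of any EARLIER chain's join-string in the length-descending
--     # order (equivalent to A's greedy kept-set by transitivity of substrings).
--     order = sorted(chains, key=len, reverse=True)
--     strs = [",".join(c) for c in order]
--     return [c for k, (s, c) in enumerate(zip(strs, order))
--             if not any(s in t for t in strs[:k])]
-- ===== Notes on version B (the rewrite author's own statement) =====
-- stated objective: alternative
-- what changed: B replaces A's greedy accumulation of a kept-set (testing each chain against the chains kept so far, re-joining each kept chain in the inner loop) by a stateless filter: after the same length-descending sort it precomputes every join-string once and keeps a chain iff its join is not a substring of ANY earlier chain's join; the two coincide by transitivity of the substring relation. B does not mutate its argument (A sorts chains in place).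
import Mathlib
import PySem

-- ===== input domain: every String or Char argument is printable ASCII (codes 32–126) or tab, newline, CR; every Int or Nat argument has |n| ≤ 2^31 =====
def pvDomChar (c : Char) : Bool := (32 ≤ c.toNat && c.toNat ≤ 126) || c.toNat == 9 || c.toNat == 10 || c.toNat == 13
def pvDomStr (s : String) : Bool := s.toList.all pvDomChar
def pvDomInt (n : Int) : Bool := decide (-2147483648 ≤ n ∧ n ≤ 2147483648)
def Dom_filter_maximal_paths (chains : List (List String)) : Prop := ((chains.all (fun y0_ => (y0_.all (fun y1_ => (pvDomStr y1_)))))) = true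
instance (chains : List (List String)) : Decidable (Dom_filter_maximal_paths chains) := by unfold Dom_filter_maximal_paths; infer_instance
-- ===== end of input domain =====

-- B replaces A's greedy kept-set by a stateless prefix filter after the same sort (equal by
-- substring transitivity); equivalence is about the RETURN value only — A sorts its argument
-- in place, B does not mutate it.


-- ===== PORT A =====
-- A's local `chain_str = ",".join(chain)` is inlined (it is used twice, unchanged)
def filter_maximal_paths (chains : List (List String)) : List (List String) :=
  if chains = [] then []
  else
    (PySem.List.sorted chains (fun c => (c.length : Int)) true).foldl
      (fun maximal chain =>
        if maximal.any (fun existing =>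
            PySem.Str.isIn (PySem.Str.join "," chain) (PySem.Str.join "," existing)) then
          maximal
        else maximal ++ [chain]) []

-- ===== PORT B =====
-- B's locals `order` and `strs` are inlined into the comprehension, unchanged
def filter_maximal_paths_alt (chains : List (List String)) : List (List String) :=
  ((PySem.List.enumerate
        (((PySem.List.sorted chains (fun c => (c.length : Int)) true).map
              (fun c => PySem.Str.join "," c)).zip
          (PySem.List.sorted chains (fun c => (c.length : Int)) true)) 0).filter
      (fun kp =>
        !((PySem.List.slice
              ((PySem.List.sorted chains (fun c => (c.length : Int)) true).map
                (fun c => PySem.Str.join "," c)) none (some kp.1)).any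
            (fun t => PySem.Str.isIn kp.2.1 t)))).map
    (fun kp => kp.2.2)

-- ===== PRECONDITION & SPEC =====
def Spec_filter_maximal_paths (chains : List (List String)) (out : List (List String)) : Prop := out = filter_maximal_paths_alt chains
instance (chains : List (List String)) (out : List (List String)) : Decidable (Spec_filter_maximal_paths chains out) := by unfold Spec_filter_maximal_paths; infer_instance

-- ===== CLAIM (what is proved, stated in full; the proofs are below) =====
def Claim_equal_filter_maximal_paths : Prop := ∀ (chains : List (List String)), Dom_filter_maximal_paths chains → Spec_filter_maximal_paths chains (filter_maximal_paths chains)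

-- ===== LEMMAS AND PROOFS =====

-- the join-string of a chain
def pvF (c : List String) : String := PySem.Str.join "," c

-- structural form of B's filter: walk the sorted list, `seen` holding the join-strings of
-- ALL earlier chains
def pvBspec (seen : List String) : List (List String) → List (List String)
  | [] => []
  | c :: rest =>
      (if seen.any (fun t => PySem.Str.isIn (pvF c) t) then [] else [c]) ++
        pvBspec (seen ++ [pvF c]) rest

theorem pvB_eq_bspec (suf : List (List String)) : ∀ (pre : List (List String)),
    ((PySem.List.enumerate ((suf.map pvF).zip suf) ((pre.length : Nat) : Int)).filter
        (fun kp => !((PySem.List.slice ((pre ++ suf).map pvF) none (some kp.1)).any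
            (fun t => PySem.Str.isIn kp.2.1 t)))).map (fun kp => kp.2.2)
      = pvBspec (pre.map pvF) suf := by
  induction suf with
  | nil => intro pre; simp [pvBspec]
  | cons c rest ih =>
    intro pre
    have hslice : PySem.List.slice ((pre ++ c :: rest).map pvF) none (some ((pre.length : Nat) : Int))
        = pre.map pvF := by
      rw [PySem.List.slice_to_natCast, List.map_append]
      exact List.take_left' (by simp)
    have hstep : ((pre.length : Nat) : Int) + 1 = (((pre ++ [c]).length : Nat) : Int) := by
      simp
    have ihx := ih (pre ++ [c])
    rw [List.append_assoc, List.singleton_append] at ihx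
    rw [List.map_cons, List.zip_cons_cons, PySem.List.enumerate_cons, List.filter_cons, hstep]
    simp only [hslice]
    by_cases h : (pre.map pvF).any (fun t => PySem.Str.isIn (pvF c) t)
    · rw [if_neg (by simpa using h), ihx, pvBspec, if_pos h, List.nil_append]
      simp
    · rw [if_pos (by simpa using h), List.map_cons, ihx, pvBspec, if_neg h]
      simp

theorem pvCond_eq (m : List (List String)) (seen : List String) (c : List String)
    (h1 : ∀ e ∈ m, pvF e ∈ seen)
    (h2 : ∀ t ∈ seen, ∃ e ∈ m, t.toList <:+: (pvF e).toList) :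
    m.any (fun e => PySem.Str.isIn (pvF c) (pvF e)) = seen.any (fun t => PySem.Str.isIn (pvF c) t) := by
  rw [Bool.eq_iff_iff]
  simp only [List.any_eq_true, PySem.Str.isIn_iff_infix]
  constructor
  · rintro ⟨e, he, hinf⟩
    exact ⟨pvF e, h1 e he, hinf⟩
  · rintro ⟨t, ht, hinf⟩
    obtain ⟨e, hem, hte⟩ := h2 t ht
    exact ⟨e, hem, hinf.trans hte⟩

theorem pvA_eq_bspec (suf : List (List String)) : ∀ (m : List (List String)) (seen : List String),
    (∀ e ∈ m, pvF e ∈ seen) →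
    (∀ t ∈ seen, ∃ e ∈ m, t.toList <:+: (pvF e).toList) →
    suf.foldl (fun maximal chain =>
        if maximal.any (fun existing => PySem.Str.isIn (pvF chain) (pvF existing)) then maximal
        else maximal ++ [chain]) m
      = m ++ pvBspec seen suf := by
  induction suf with
  | nil => intro m seen _ _; simp [pvBspec]
  | cons c rest ih =>
    intro m seen h1 h2
    rw [List.foldl_cons, pvBspec, pvCond_eq m seen c h1 h2]
    by_cases h : seen.any (fun t => PySem.Str.isIn (pvF c) t)
    · rw [if_pos h, if_pos h, List.nil_append]
      refine ih m (seen ++ [pvF c]) (fun e he => by simp [h1 e he]) ?_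
      intro t ht
      rcases List.mem_append.mp ht with ht' | ht'
      · exact h2 t ht'
      · simp only [List.mem_singleton] at ht'
        subst ht'
        simp only [List.any_eq_true, PySem.Str.isIn_iff_infix] at h
        obtain ⟨u, hu, hinf⟩ := h
        obtain ⟨e, hem, hue⟩ := h2 u hu
        exact ⟨e, hem, hinf.trans hue⟩
    · rw [if_neg h, if_neg h]
      rw [ih (m ++ [c]) (seen ++ [pvF c]) ?_ ?_]
      · simp
      · intro e he
        rcases List.mem_append.mp he with he' | he'
        · simp [h1 e he']
        · simp only [List.mem_singleton] at he'; subst he'; simp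
      · intro t ht
        rcases List.mem_append.mp ht with ht' | ht'
        · obtain ⟨e, hem, hte⟩ := h2 t ht'
          exact ⟨e, by simp [hem], hte⟩
        · simp only [List.mem_singleton] at ht'; subst ht'
          exact ⟨c, by simp, List.infix_refl _⟩

-- ===== VERDICT (by name: the statement is the Claim_ definition above) =====
theorem filter_maximal_paths_spec : Claim_equal_filter_maximal_paths := by
  intro chains _
  unfold Spec_filter_maximal_paths filter_maximal_paths filter_maximal_paths_alt
  have hB := pvB_eq_bspec (PySem.List.sorted chains (fun c => (c.length : Int)) true) []
  simp only [List.length_nil, Nat.cast_zero, List.nil_append, List.map_nil] at hB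
  have hA := pvA_eq_bspec (PySem.List.sorted chains (fun c => (c.length : Int)) true) [] []
    (by simp) (by simp)
  rw [List.nil_append] at hA
  by_cases hc : chains = []
  · subst hc; rfl
  · rw [if_neg hc]
    exact hA.trans hB.symm
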